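-- pv_equiv track=rewrite | github.com/fermarcosmac/DDSP-adaptive-EQ-26 | src/scripts/metrics_eval.py | _parse_optimizer_from_stem
-- ===== SOURCE A (Python) =====
-- def _safe_token(text: str) -> str:
--     return str(text).replace("-", "_").replace(" ", "_")
--
-- def _parse_optimizer_from_stem(parts: list[str], known_optimizers: list[str]) -> str:
--     post_eq_parts = parts[1:]
--     candidate_tokens = sorted(
--         [(_safe_token(opt).split("_"), opt) for opt in known_optimizers],
--         key=lambda item: len(item[0]),
--         reverse=True,
--     )
--
--     for opt_tokens, opt_display in candidate_tokens:
--         if post_eq_parts[: len(opt_tokens)] == opt_tokens: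
--             return opt_display
--
--     if post_eq_parts:
--         return post_eq_parts[0]
--     return "unknown"
-- ===== SOURCE B (Python) =====
-- def _safe_token(text: str) -> str:
--     return str(text).replace("-", "_").replace(" ", "_")
--
-- def _parse_optimizer_from_stem(parts: list[str], known_optimizers: list[str]) -> str:
--     post_eq_parts = parts[1:]
--     best_name = None
--     best_len = -1
--     for opt in known_optimizers:
--         toks = _safe_token(opt).split("_")
--         if len(toks) > best_len and post_eq_parts[: len(toks)] == toks:
--             best_name, best_len = opt, len(toks)
--     if best_name is not None:
--         return best_name
--     return post_eq_parts[0] if post_eq_parts else "unknown"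
-- ===== Notes on version B (the rewrite author's own statement) =====
-- stated objective: simpler
-- what changed: Replaces A's 'build all token lists, stable-sort them by descending token count, return the first prefix match' by a single linear pass over known_optimizers that tracks the longest prefix match seen so far (strict > keeps the first-listed optimizer on ties), removing the intermediate list and the sort.
import Mathlib
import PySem

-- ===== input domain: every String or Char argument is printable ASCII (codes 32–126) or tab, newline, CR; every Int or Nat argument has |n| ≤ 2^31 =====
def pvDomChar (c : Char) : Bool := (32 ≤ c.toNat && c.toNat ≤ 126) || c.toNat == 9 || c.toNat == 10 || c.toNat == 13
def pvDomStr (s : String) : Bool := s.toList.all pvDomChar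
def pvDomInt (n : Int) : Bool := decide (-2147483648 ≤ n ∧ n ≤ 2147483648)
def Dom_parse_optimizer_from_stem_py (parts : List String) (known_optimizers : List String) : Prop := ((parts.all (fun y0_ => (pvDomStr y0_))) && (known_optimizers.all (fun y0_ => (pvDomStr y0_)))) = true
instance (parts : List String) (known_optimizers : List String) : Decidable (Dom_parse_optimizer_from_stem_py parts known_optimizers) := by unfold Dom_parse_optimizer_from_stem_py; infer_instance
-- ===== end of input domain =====

-- B replaces A's 'tokenize all, stable-sort by descending token count, first prefix match'
-- by a single pass tracking the longest prefix match (strict > keeps the first on ties): simpler, no sort.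

-- ===== PORT A =====
def safe_token (text : String) : String :=
  PySem.Str.replace (PySem.Str.replace text "-" "_") " " "_"

-- s.split("_") with the nonempty literal separator; split? is some here, getD only makes it total
def splitU (s : String) : List String :=
  (PySem.Str.split? s "_").getD []

-- the for-loop of A with its early return
def pyFirstMatch (post : List String) : List (List String × String) → Option String
  | [] => none
  | (opt_tokens, opt_display) :: rest =>
      if PySem.List.slice post none (some (opt_tokens.length : Int)) == opt_tokens then
        some opt_display
      else pyFirstMatch post rest

def parse_optimizer_from_stem_py (parts : List String) (known_optimizers : List String) : String :=
  let post_eq_parts := PySem.List.slice parts (some 1) none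
  let candidate_tokens :=
    PySem.List.sorted
      (known_optimizers.map (fun opt => (splitU (safe_token opt), opt)))
      (fun item => item.1.length) true
  match pyFirstMatch post_eq_parts candidate_tokens with
  | some d => d
  | none =>
      match post_eq_parts with
      | p0 :: _ => p0
      | [] => "unknown"

-- ===== PORT B =====
def parse_optimizer_from_stem_py_alt (parts : List String) (known_optimizers : List String) : String :=
  let post_eq_parts := PySem.List.slice parts (some 1) none
  let best :=
    known_optimizers.foldl
      (fun (b : Option String × Int) opt =>
        let toks := splitU (safe_token opt)
        if ((toks.length : Int) > b.2
            && PySem.List.slice post_eq_parts none (some (toks.length : Int)) == toks) then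
          (some opt, (toks.length : Int))
        else b)
      (none, -1)
  match best.1 with
  | some n => n
  | none =>
      match post_eq_parts with
      | p0 :: _ => p0
      | [] => "unknown"

-- ===== PRECONDITION & SPEC =====
def Spec_parse_optimizer_from_stem_py (parts : List String) (known_optimizers : List String) (out : String) : Prop := out = parse_optimizer_from_stem_py_alt parts known_optimizers
instance (parts : List String) (known_optimizers : List String) (out : String) : Decidable (Spec_parse_optimizer_from_stem_py parts known_optimizers out) := by unfold Spec_parse_optimizer_from_stem_py; infer_instance

-- ===== CLAIM (what is proved, stated in full; the proofs are below) =====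
def Claim_equal_parse_optimizer_from_stem_py : Prop := ∀ (parts : List String) (known_optimizers : List String), Dom_parse_optimizer_from_stem_py parts known_optimizers → Spec_parse_optimizer_from_stem_py parts known_optimizers (parse_optimizer_from_stem_py parts known_optimizers)

-- ===== LEMMAS AND PROOFS =====

-- the prefix test both programs perform, with the slice reduced to take
def matchTok (post : List String) (c : List String × String) : Bool :=
  post.take c.1.length == c.1

-- A's sorted-scan, reformulated as a fold step on the optional current best
def stepBest (post : List String) (o : Option (List String × String))
    (x : List String × String) : Option (List String × String) :=
  match o with
  | none => if matchTok post x then some x else none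
  | some b => if matchTok post x && decide (b.1.length < x.1.length) then some x else some b

lemma matchTok_eq_slice (post : List String) (c : List String × String) :
    (PySem.List.slice post none (some (c.1.length : Int)) == c.1) = matchTok post c := by
  simp [matchTok, PySem.List.slice_to_natCast]

lemma pyFirstMatch_eq_find (post : List String) (cs : List (List String × String)) :
    pyFirstMatch post cs = (cs.find? (matchTok post)).map Prod.snd := by
  induction cs with
  | nil => rfl
  | cons c rest ih =>
      obtain ⟨t, d⟩ := c
      rw [pyFirstMatch, matchTok_eq_slice post (t, d), List.find?_cons]
      by_cases h : matchTok post (t, d) = true <;> simp [h, ih]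

lemma find?_mem_le_head (post : List String) (y : List String × String)
    (ys : List (List String × String))
    (hp : (y :: ys).Pairwise (fun a b => b.1.length ≤ a.1.length))
    (b : List String × String) (hb : List.find? (matchTok post) (y :: ys) = some b) :
    b.1.length ≤ y.1.length := by
  have hmem := List.mem_of_find?_eq_some hb
  rcases List.mem_cons.mp hmem with h | h
  · subst h; exact le_refl _
  · exact (List.pairwise_cons.mp hp).1 b h

-- inserting x into a descending-by-token-count list commutes with find? via stepBest
lemma find_insertBy (post : List String) (x : List String × String) :
    ∀ (s : List (List String × String)),
      s.Pairwise (fun a b => b.1.length ≤ a.1.length) →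
      List.find? (matchTok post)
          (PySem.List.insertBy
            (fun a b => decide ((fun c : List String × String => c.1.length) b
                              < (fun c : List String × String => c.1.length) a)) x s)
        = stepBest post (List.find? (matchTok post) s) x := by
  intro s
  induction s with
  | nil =>
      intro _
      cases hx : matchTok post x <;> simp [PySem.List.insertBy, stepBest, hx]
  | cons y ys ih =>
      intro hp
      rw [PySem.List.insertBy]
      by_cases hlt : y.1.length < x.1.length
      · rw [if_pos (by simpa using hlt), List.find?_cons]
        cases hfy : List.find? (matchTok post) (y :: ys) with
        | none =>
            cases hx : matchTok post x <;> simp [stepBest, hx]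
        | some b =>
            have hble := find?_mem_le_head post y ys hp b hfy
            have hblt : b.1.length < x.1.length := by omega
            cases hx : matchTok post x <;> simp [stepBest, hx, hblt]
      · rw [if_neg (by simpa using hlt)]
        have hys : ys.Pairwise (fun a b => b.1.length ≤ a.1.length) :=
          (List.pairwise_cons.mp hp).2
        rw [List.find?_cons, List.find?_cons, ih hys]
        cases hy : matchTok post y
        · simp
        · cases hx : matchTok post x <;> simp [stepBest, hx, hlt]

-- the sorted-then-find of A equals the left fold of stepBest over the original order
lemma find_sortedRev_eq_foldl (post : List String)
    (l : List (List String × String)) :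
    List.find? (matchTok post)
        (PySem.List.sorted l (fun item => item.1.length) true)
      = l.foldl (stepBest post) none := by
  induction l using List.reverseRecOn with
  | nil => simp [PySem.List.sorted_rev_eq_foldl_insertBy]
  | append_singleton l x ih =>
      rw [PySem.List.sorted_rev_eq_foldl_insertBy] at ih ⊢
      rw [List.foldl_append, List.foldl_append]
      simp only [List.foldl_cons, List.foldl_nil]
      have hp : (List.foldl (fun acc x =>
            PySem.List.insertBy (fun a b =>
              decide ((fun item : List String × String => item.1.length) b
                    < (fun item : List String × String => item.1.length) a)) x acc) [] l).Pairwise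
          (fun a b => b.1.length ≤ a.1.length) := by
        have := PySem.List.sorted_pairwise_rev l (fun item : List String × String => item.1.length)
        rwa [PySem.List.sorted_rev_eq_foldl_insertBy] at this
      rw [find_insertBy post x _ hp, ih]

-- B's state is A's optional best, encoded as (name, token count with -1 for none)
def encodeBest : Option (List String × String) → Option String × Int
  | none => (none, -1)
  | some b => (some b.2, (b.1.length : Int))

lemma foldl_alt_eq_encode (post : List String) (l : List String) :
    l.foldl
      (fun (b : Option String × Int) opt =>
        let toks := splitU (safe_token opt)
        if ((toks.length : Int) > b.2
            && PySem.List.slice post none (some (toks.length : Int)) == toks) then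
          (some opt, (toks.length : Int))
        else b)
      (none, -1)
    = encodeBest
        ((l.map (fun opt => (splitU (safe_token opt), opt))).foldl
          (stepBest post) none) := by
  rw [List.foldl_map]
  suffices h : ∀ (t : List String) (o : Option (List String × String)),
      t.foldl
        (fun (b : Option String × Int) opt =>
          let toks := splitU (safe_token opt)
          if ((toks.length : Int) > b.2
              && PySem.List.slice post none (some (toks.length : Int)) == toks) then
            (some opt, (toks.length : Int))
          else b)
        (encodeBest o)
      = encodeBest (t.foldl (fun o opt => stepBest post o (splitU (safe_token opt), opt)) o) by
    exact h l none
  intro t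
  induction t with
  | nil => intro _; rfl
  | cons a t ih =>
      intro o
      rw [List.foldl_cons, List.foldl_cons]
      have key :
          (let toks := splitU (safe_token a)
           if ((toks.length : Int) > (encodeBest o).2
               && PySem.List.slice post none (some (toks.length : Int)) == toks) then
             (some a, (toks.length : Int))
           else encodeBest o)
          = encodeBest (stepBest post o (splitU (safe_token a), a)) := by
        generalize splitU (safe_token a) = tk
        cases o with
        | none =>
            simp only [encodeBest, stepBest]
            rw [matchTok_eq_slice post (tk, a)]
            have hgt : ((tk.length : Int) > (-1 : Int)) := by omega
            cases h : matchTok post (tk, a) <;>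
              simp [h, hgt, encodeBest]
        | some b =>
            simp only [encodeBest, stepBest]
            rw [matchTok_eq_slice post (tk, a)]
            cases h : matchTok post (tk, a)
            · simp [h, encodeBest]
            · by_cases hl : b.1.length < tk.length
              · have hi : ((tk.length : Int) > (b.1.length : Int)) := by exact_mod_cast hl
                simp [h, hl, hi, encodeBest]
              · have hi : ¬ ((tk.length : Int) > (b.1.length : Int)) := by exact_mod_cast hl
                simp [h, hl, hi, encodeBest]
      rw [key, ih]

-- ===== VERDICT (by name: the statement is the Claim_ definition above) =====
theorem parse_optimizer_from_stem_py_spec : Claim_equal_parse_optimizer_from_stem_py := by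
  intro parts known _
  unfold Spec_parse_optimizer_from_stem_py
  unfold parse_optimizer_from_stem_py parse_optimizer_from_stem_py_alt
  simp only
  rw [pyFirstMatch_eq_find, find_sortedRev_eq_foldl, foldl_alt_eq_encode]
  cases ((known.map (fun opt => (splitU (safe_token opt), opt))).foldl
      (stepBest (PySem.List.slice parts (some 1) none)) none) with
  | none => rfl
  | some b => rfl
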